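/-
  INTERFACE AND NON-VACUITY CHECKS OF Vorbis/Spec/PacketRest.lean (S-TEMPLATE, quality checks 2 and 3): for the call sites of
  vorbis_decode_packet_rest, the callee's precondition FOLLOWS from the caller's assertion (`DecodeInv` of the current memory + the facts
  the walker has about the argument registers). Nothing here is used by a unit statement.

      floor_pre_target            `DecodeInv` ⊢ the `target` clause of do_floor's precondition, for `target = f->channel_buffers[c]`
      floor_pre_finalY            `DecodeInv` ⊢ the `finalY` clause, for `finalY = f->finalY[c]`
      do_floor_pre                … all of `do_floor.spec`'s precondition at the call site of segment .11
      readerPre_of_inv            `DecodeInv` ⊢ S2's `ReaderPre` (get_bits, prep_huffman, flush_packet)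
      bookPre_of_inv              `DecodeInv` ⊢ S3's `BookPre` (codebook_decode_scalar_raw), for a codebook of `f`
      residue_pre_of_inv          `DecodeInv` + `ShadowPre` + `Args` IS `DecodeResidue.Pre` (decode_residue's precondition is "the invariant + the arguments")
      predict_point_pre           FL10 ⊢ predict_point's precondition (segment .5)
      draw_line_pre               do_floor's loop facts ⊢ draw_line's precondition
      seg16_unit                  the statement of the unit `vorbis_decode_packet_rest.16` (the dead `return error(…)`) is proved from FL3: no walk
      composition_unit            the statement of the unit `vorbis_decode_packet_rest.COMPOSITION` is proved by `Comp.composition`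
-/
import Vorbis.Spec.PacketRest
import Vorbis.Spec.Reader
import Vorbis.Spec.Codebook
import Vorbis.Spec.DecodeResidue
import Vorbis.Spec.PacketRestComp
import Vorbis.Spec.Units.vorbis_decode_packet_rest_COMPOSITION
import Vorbis.Spec.Units.vorbis_decode_packet_rest_16
namespace Vorbis.Spec.PacketRestTest
open X86 X86.User Asan Vorbis Vorbis.Spec Vorbis.Spec.vorbis_decode_packet_rest

variable {others : List Obj} {frames : List (Nat × FrameLayout)} {len : Nat} {Ar : Arena} {stored room : Int}
  {ysz : Nat → Nat} {mem : Mem} {f : Nat}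

/-- The `target` clause of do_floor's precondition at the call site of segment .11: `target = f->channel_buffers[c]`, and
`4·n2 ≤ 4·b1` bytes of it are used. -/
theorem floor_pre_target (h : DecodeInv others frames len Ar stored room ysz mem f) {c : Nat}
    (hc : (c : Int) < stb_vorbis.channels mem f) {k : Nat} (hk : k ≤ 4 * bsize mem f 1) (hpos : 0 < bsize mem f 1) :
    LiveIn others frames (stb_vorbis.channel_buffers mem f c) k ∧
      (Block.mk (stb_vorbis.channel_buffers mem f c) k).disjoint (floorBlock mem f) := by
  constructor
  · exact (h.chanLive hc hpos).sub _ _ (Nat.le_refl _) (by omega)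
  · have hd := h.sep.buf (floorBlock mem f) ConfigOK.Reads.floor _ (SampleBuf.chan c hc)
    simp only [vblock] at hd ⊢
    omega

/-- The `finalY` clause of do_floor's precondition: `finalY = f->finalY[c]`. -/
theorem floor_pre_finalY (h : DecodeInv others frames len Ar stored room ysz mem f) {c : Nat}
    (hc : (c : Int) < stb_vorbis.channels mem f) :
    ∃ sz : Nat, RunBlk Ar len ⟨stb_vorbis.finalY mem f c, sz⟩ ∧
      ∀ g : Nat, IsFloor mem f g → 2 * Floor1.values mem g ≤ (sz : Int) := by
  obtain ⟨hb, hsz⟩ := h.fy c hc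
  refine ⟨ysz c, hb, ?_⟩
  intro g hg
  obtain ⟨i, hi, rfl⟩ := hg
  exact hsz i hi

/-- **do_floor's precondition at its call site** (segment .11, 0x11187a): from `DecodeInv` of the current memory, the shadow clause of
the state at do_floor's entry, the mode, and what the walker knows of the argument registers. -/
theorem do_floor_pre (s : State) (mode c : Nat) (hsh : ShadowPre others frames s)
    (h : DecodeInv others frames len Ar stored room ysz s.mem (s.reg .rdi).toNat)
    (hmode : (mode : Int) < stb_vorbis.mode_count s.mem (s.reg .rdi).toNat)
    (hrsi : (s.reg .rsi).toNat =
      mapOf s.mem (s.reg .rdi).toNat (stb_vorbis.mode_config_at (s.reg .rdi).toNat mode))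
    (hc : (c : Int) < stb_vorbis.channels s.mem (s.reg .rdi).toNat) (hrdx : s32 (s.reg .rdx) = c)
    (hr8 : (s.reg .r8).toNat = stb_vorbis.channel_buffers s.mem (s.reg .rdi).toNat c)
    (hr9 : (s.reg .r9).toNat = stb_vorbis.finalY s.mem (s.reg .rdi).toNat c)
    (hn : 4 * (s32 (s.reg .rcx) / 2).toNat ≤ 4 * bsize s.mem (s.reg .rdi).toNat 1)
    (hpos : 0 < bsize s.mem (s.reg .rdi).toNat 1) :
    (do_floor.spec others frames (RunBlk Ar len)
      (Mode.mapping s.mem (stb_vorbis.mode_config_at (s.reg .rdi).toNat mode))).pre s := by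
  have hv := h.fb.vorbis
  have hmap := hv.mode.mapping_lt hmode
  refine ⟨hsh, h.fb.env.ok, h.fb.env.live, Real.VorbisOK.obj hv, hv.floor, hv.mapping, hmap, hrsi, ?_, ?_, ?_, h.g_db⟩
  · rw [hrdx]
    exact ⟨by omega, hc⟩
  · rw [hr9]
    exact floor_pre_finalY h hc
  · right
    rw [hr8]
    exact floor_pre_target h hc hn hpos

/-- **S2's `ReaderPre`** (the precondition of get_bits, prep_huffman, flush_packet) from `DecodeInv`: `ReaderEnv` is `BlkLive` (in FB), `*f`
inside one live object (`DecodeInv.objLive`) and the input (`DecodeInv.inp`). -/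
theorem readerPre_of_inv (s : State) (hsh : ShadowPre others frames s)
    (h : DecodeInv others frames len Ar stored room ysz s.mem (s.reg .rdi).toNat) :
    ReaderPre others frames (RunBlk Ar len) len s :=
  ⟨hsh, ⟨h.fb.env.live, h.objLive, h.inp⟩, h.fb.vorbis.bits⟩

/-- **S3's `BookPre`** (the precondition of codebook_decode_scalar_raw) from `DecodeInv`, for the codebook `i < codebook_count` of `f` in
rsi: the struct lies in the allocated codebooks block (CB0), `CodebookOK` is the invariant's, `BookApart` is `DecodeInv.books`. -/
theorem bookPre_of_inv (s : State) (i : Nat) (hsh : ShadowPre others frames s)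
    (h : DecodeInv others frames len Ar stored room ysz s.mem (s.reg .rdi).toNat)
    (hi : (i : Int) < stb_vorbis.codebook_count s.mem (s.reg .rdi).toNat)
    (hrsi : (s.reg .rsi).toNat = stb_vorbis.codebooks_at s.mem (s.reg .rdi).toNat i) :
    BookPre others frames (RunBlk Ar len) len s := by
  have hv := h.fb.vorbis
  have hcb := hv.codebooks
  have hin := CodebooksUpTo.book_in (groups_laws len) hcb hi
  have hb := h.books i hi
  refine ⟨readerPre_of_inv s hsh h, h.fb.env.ok, ?_, ?_, ?_⟩
  · rw [hrsi]
    exact hin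
  · rw [hrsi]
    exact hcb.ok i (by omega)
  · rw [hrsi]
    exact hb

/-- **decode_residue's precondition at its call site** (segment .9, the call at 0x111685): `DecodeResidue.Pre` is literally the
shadow clause of the state at the callee's entry, the caller's `DecodeInv` (for the same ghosts, the decoder object in rdi) and
P1 / P2 of the six argument registers (`DecodeResidue.Args`) — nothing is derived. -/
theorem residue_pre_of_inv (s : State) (hsh : ShadowPre others frames s)
    (h : DecodeInv others frames len Ar stored room ysz s.mem (s.reg .rdi).toNat)
    (hargs : DecodeResidue.Args others frames s.mem (s.reg .rdi).toNat (s.reg .rsi).toNat ((s.reg .rdx).toNat % 2 ^ 32)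
      ((s.reg .rcx).toNat % 2 ^ 32) ((s.reg .r8).toNat % 2 ^ 32) (s.reg .r9).toNat ((s.reg .rsp).toNat + 8)) :
    DecodeResidue.Pre len Ar others frames stored room ysz s :=
  ⟨hsh, h, hargs⟩

/-- **predict_point's precondition at its call site** (segment .5, 0x1111a1): esi = `Xlist[low]`, edx = `Xlist[high]`, both
zero-extended `uint16`s, with `Xlist[low] ≤ Xlist[j] < Xlist[high]` (FL10: `NbOK`). -/
theorem predict_point_pre (s : State) (g j : Nat) (hsh : ShadowPre others frames s) (hnb : NbOK mem g j)
    (hrsi : (s.reg .rsi).toNat = Floor1.Xlist mem g (Floor1.neighbors mem g j 0))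
    (hrdx : (s.reg .rdx).toNat = Floor1.Xlist mem g (Floor1.neighbors mem g j 1)) :
    (predict_point.spec others frames).pre s := by
  obtain ⟨_, _, hle, hlt⟩ := hnb
  have h1 := Floor1.Xlist_lt mem g (Floor1.neighbors mem g j 1)
  have h0 := Floor1.Xlist_lt mem g (Floor1.neighbors mem g j 0)
  refine ⟨hsh, ?_, ?_⟩
  · rw [hrsi, hrdx]
    omega
  · rw [hrdx]
    omega

/-- **draw_line's precondition at its call site in do_floor** (0x108aae): `x0 = lx`, `x1 = hx` in `[0, 65535]` and different,
`|y0|, |y1| ≤ 32768·255` (`Vorbis.mul_i16_u8_bound`), `output = target`, `n = n2`, the `4·n2` bytes of the target inside one live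
object (do_floor's own precondition). -/
theorem draw_line_pre (s : State) (hsh : ShadowPre others frames s) (hdb : Vorbis.Globals.inverse_db_table.obj ∈ others)
    (hx0 : 0 ≤ s32 (s.reg .rsi) ∧ s32 (s.reg .rsi) < 65536) (hx1 : 0 ≤ s32 (s.reg .rcx) ∧ s32 (s.reg .rcx) < 65536)
    (hne : s32 (s.reg .rcx) ≠ s32 (s.reg .rsi))
    (hy0 : -8355840 ≤ s32 (s.reg .rdx) ∧ s32 (s.reg .rdx) ≤ 8355585)
    (hy1 : -8355840 ≤ s32 (s.reg .r8) ∧ s32 (s.reg .r8) ≤ 8355585)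
    (hlive : 0 < s32 (s.reg .r9) → LiveIn others frames (s.reg .rdi).toNat (4 * (s32 (s.reg .r9)).toNat)) :
    (draw_line.spec others frames).pre s := by
  refine ⟨hsh, hdb, hne, ?_, ?_, ?_⟩
  · omega
  · omega
  · intro hlt
    refine ⟨hx0.1, hlive ?_⟩
    have := Int.min_le_right (s32 (s.reg .rcx)) (s32 (s.reg .r9))
    omega

/-- **Segment .16 is dead**: its entry assertion says `floor_types[fl] = 0` for a floor `fl < floor_count`; FL3 says 1. -/
theorem seg16 (Lay : Layout) (μ : Microarch) (u₀ : State) : Seg16 Lay μ u₀ := by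
  intro others frames len Ar stored room mode ysz u ret v a16
  obtain ⟨fl, hfl, h0⟩ := a16.dead
  have h1 := (Real.VorbisOK.config a16.toStable.toFrame.inv.fb.vorbis).floor.FL3 fl hfl
  rw [h0] at h1
  exact absurd h1 (by decide)

/-- The statement of the unit `vorbis_decode_packet_rest.16`, proved (its hypotheses — the code, `error`'s contract — are not used). -/
theorem seg16_unit : Vorbis.Spec.vorbis_decode_packet_rest_16.Statement := by
  intro Lay _ μ _ u₀ _ _
  exact seg16 Lay μ u₀

/-- **The composition unit's statement, proved** (Vorbis/Spec/PacketRestComp.lean): what the unit's `Proof.lean` is. -/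
theorem composition_unit : Vorbis.Spec.vorbis_decode_packet_rest_COMPOSITION.Statement := by
  intro Lay _ μ _ u₀ h1 h2 h3 h4 h5 h6 h7 h8 h9 h10 h11 h12 h13 h14 h15 h16 others frames len Ar stored room mode ysz
  exact Comp.composition h1 h2 h3 h4 h5 h6 h7 h8 h9 h10 h11 h12 h13 h14 h15 h16 others frames len Ar stored room mode ysz

end Vorbis.Spec.PacketRestTest
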